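-- pv_equiv track=rewrite | github.com/docman1967/docflix-video-converter | modules/media_info.py | _compute_type_index
-- ===== SOURCE A (Python) =====
-- def _compute_type_index(streams, abs_index, codec_type):
--     """Compute the type-relative stream index for ffmpeg specifiers."""
--     count = 0
--     for s in streams:
--         if int(s.get('index', -1)) == abs_index:
--             return count
--         if s.get('codec_type') == codec_type:
--             count += 1
--     return 0
-- ===== SOURCE B (Python) =====
-- def _compute_type_index(streams, abs_index, codec_type):
--     """Compute the type-relative stream index for ffmpeg specifiers."""
--     pos = None
--     for i, s in enumerate(streams):
--         if int(s.get('index', -1)) == abs_index: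
--             pos = i
--             break
--     if pos is None:
--         return 0
--     return sum(1 for s in streams[:pos] if s.get('codec_type') == codec_type)
-- ===== Notes on version B (the rewrite author's own statement) =====
-- stated objective: alternative
-- what changed: Replaces A's single interleaved count-while-scanning loop (running counter updated between the two checks) with two separate passes: a locate pass that finds the position of the first stream whose parsed index equals abs_index, then an independent count of codec_type matches over the prefix before that position.
import Mathlib
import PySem

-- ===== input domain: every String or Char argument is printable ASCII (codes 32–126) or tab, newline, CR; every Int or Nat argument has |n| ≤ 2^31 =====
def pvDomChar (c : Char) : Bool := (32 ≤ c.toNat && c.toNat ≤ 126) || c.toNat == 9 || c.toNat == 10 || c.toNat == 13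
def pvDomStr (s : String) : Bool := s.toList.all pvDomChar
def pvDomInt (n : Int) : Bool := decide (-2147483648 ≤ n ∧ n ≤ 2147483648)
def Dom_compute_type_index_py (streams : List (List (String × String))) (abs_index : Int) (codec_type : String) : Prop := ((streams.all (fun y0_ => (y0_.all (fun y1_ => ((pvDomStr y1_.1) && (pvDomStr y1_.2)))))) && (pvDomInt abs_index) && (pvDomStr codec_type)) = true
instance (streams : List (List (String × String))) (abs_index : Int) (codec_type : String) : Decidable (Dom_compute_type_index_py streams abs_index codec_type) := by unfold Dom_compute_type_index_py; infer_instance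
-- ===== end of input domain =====

-- B replaces A's interleaved count-while-scanning loop by a locate pass (first stream whose
-- parsed index equals abs_index) followed by an independent count over the prefix; alternative
-- decomposition, same O(n) cost. Return-value equivalence; neither program mutates its arguments.

-- int(s.get('index', -1)): default -1, else Python int() on the stored string (none = ValueError)
def pvIdx (s : List (String × String)) : Option Int :=
  match (PySem.Dict.mk s).get? "index" with
  | none => some (-1)
  | some v => PySem.Int.ofStr? v

-- ===== PORT A =====
-- the loop: running count, early return at the first matching index
def pvGoA (abs_index : Int) (codec_type : String) : List (List (String × String)) → Int → Int
  | [], _ => 0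
  | s :: rest, count =>
    match pvIdx s with
    | none => 0  -- Python raises ValueError here; excluded by Pre_
    | some v =>
      if v = abs_index then count
      else if (PySem.Dict.mk s).get? "codec_type" = some codec_type then
        pvGoA abs_index codec_type rest (count + 1)
      else
        pvGoA abs_index codec_type rest count

def compute_type_index_py (streams : List (List (String × String))) (abs_index : Int) (codec_type : String) : Int :=
  pvGoA abs_index codec_type streams 0

-- ===== PORT B =====
-- locate pass of Source B: position of the first stream whose parsed index equals abs_index
def pvFind (abs_index : Int) : List (List (String × String)) → Nat → Option Nat
  | [], _ => none
  | s :: rest, i =>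
    match pvIdx s with
    | none => none  -- Python raises ValueError here; excluded by Pre_
    | some v => if v = abs_index then some i else pvFind abs_index rest (i + 1)

def compute_type_index_py_alt (streams : List (List (String × String))) (abs_index : Int) (codec_type : String) : Int :=
  match pvFind abs_index streams 0 with
  | none => 0
  | some p =>
    -- sum(1 for s in streams[:pos] if s.get('codec_type') == codec_type)
    ((streams.take p).countP (fun s => (PySem.Dict.mk s).get? "codec_type" == some codec_type) : Int)

-- ===== PRECONDITION & SPEC =====
-- Pre_ excludes exactly the inputs on which Python A raises ValueError: some stream whose
-- 'index' value does not parse as an int is reached before any stream matching abs_index.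
def Pre_compute_type_index_py (streams : List (List (String × String))) (abs_index : Int) (codec_type : String) : Prop :=
  ∀ i < streams.length, pvIdx (streams[i]!) = none → ∃ j < i, pvIdx (streams[j]!) = some abs_index
instance (streams : List (List (String × String))) (abs_index : Int) (codec_type : String) : Decidable (Pre_compute_type_index_py streams abs_index codec_type) := by unfold Pre_compute_type_index_py; infer_instance

def pvWitness_compute_type_index_py : (List (List (String × String))) × Int × String :=
  ([[("index", "0"), ("codec_type", "video")], [("index", "1"), ("codec_type", "audio")]], 1, "video")

def Spec_compute_type_index_py (streams : List (List (String × String))) (abs_index : Int) (codec_type : String) (out : Int) : Prop := out = compute_type_index_py_alt streams abs_index codec_type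
instance (streams : List (List (String × String))) (abs_index : Int) (codec_type : String) (out : Int) : Decidable (Spec_compute_type_index_py streams abs_index codec_type out) := by unfold Spec_compute_type_index_py; infer_instance

-- ===== CLAIM (what is proved, stated in full; the proofs are below) =====
def Claim_equal_compute_type_index_py : Prop := ∀ (streams : List (List (String × String))) (abs_index : Int) (codec_type : String), Dom_compute_type_index_py streams abs_index codec_type → Pre_compute_type_index_py streams abs_index codec_type → Spec_compute_type_index_py streams abs_index codec_type (compute_type_index_py streams abs_index codec_type)

-- ===== LEMMAS AND PROOFS =====

lemma pvFind_shift (abs_index : Int) (l : List (List (String × String))) (i : Nat) :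
    pvFind abs_index l (i + 1) = (pvFind abs_index l i).map (· + 1) := by
  induction l generalizing i with
  | nil => simp [pvFind]
  | cons s rest ih =>
    simp only [pvFind]
    cases pvIdx s with
    | none => rfl
    | some v =>
      by_cases h : v = abs_index <;> simp [h, ih]

lemma pvGoA_eq (abs_index : Int) (codec_type : String)
    (l : List (List (String × String))) (count : Int) :
    pvGoA abs_index codec_type l count =
      match pvFind abs_index l 0 with
      | none => 0
      | some p => count + ((l.take p).countP (fun s => (PySem.Dict.mk s).get? "codec_type" == some codec_type) : Int) := by
  induction l generalizing count with
  | nil => simp [pvGoA, pvFind]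
  | cons s rest ih =>
    simp only [pvGoA, pvFind]
    cases hidx : pvIdx s with
    | none => rfl
    | some v =>
      by_cases hv : v = abs_index
      · simp [hv]
      · simp only [hv, if_false]
        rw [show (0 : Nat) + 1 = 0 + 1 from rfl, pvFind_shift]
        by_cases hct : (PySem.Dict.mk s).get? "codec_type" = some codec_type
        · rw [if_pos hct, ih]
          cases pvFind abs_index rest 0 with
          | none => simp
          | some p =>
            simp [hct]
            ring
        · rw [if_neg hct, ih]
          cases pvFind abs_index rest 0 with
          | none => simp
          | some p =>
            simp [hct]

-- ===== VERDICT (by name: the statement is the Claim_ definition above) =====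
theorem compute_type_index_py_spec : Claim_equal_compute_type_index_py := by
  intro streams abs_index codec_type _ _
  unfold Spec_compute_type_index_py compute_type_index_py compute_type_index_py_alt
  rw [pvGoA_eq]
  cases pvFind abs_index streams 0 <;> simp
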